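-- pv_equiv track=rewrite | github.com/He-Wenhao/Vqe_and_Measurement | Pauli_Expectation.py | if_non_zero_Pauli
-- ===== SOURCE A (Python) =====
-- def if_non_zero_Pauli(P_str, l):
--     n = len(P_str)
--     if P_str == "I" * n:
--         return False
--     for i in range(n):
--         if P_str[i] != "I":
--             for j in range(n):
--                 if P_str[n - 1 - j] != "I":
--                     if n - 1 - j - i >= 2 + 2 * l:
--                         return False
--                     else:
--                         return True
-- ===== SOURCE B (Python) =====
-- def if_non_zero_Pauli(P_str, l):
--     # Counting sliding-window test: some non-identity letter exists and one
--     # window of k = 2 + 2*l consecutive positions contains ALL of them.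
--     # pref[i] = number of non-identity letters among the first i positions.
--     n = len(P_str)
--     pref = [0]
--     for c in P_str:
--         pref.append(pref[-1] + (c != 'I'))
--     total = pref[n]
--     if total == 0:
--         return False
--     k = min(max(2 + 2 * l, 0), n)
--     return any(pref[i + k] - pref[i] == total for i in range(n - k + 1))
-- ===== Notes on version B (the rewrite author's own statement) =====
-- stated objective: alternative
-- what changed: Instead of locating the first and last non-identity characters and comparing their distance, B builds a prefix-count table of non-identity letters and slides a window of k = 2+2*l positions across the string, returning True iff some window's non-identity count equals the total (i.e. one window covers them all).
import Mathlib
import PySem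

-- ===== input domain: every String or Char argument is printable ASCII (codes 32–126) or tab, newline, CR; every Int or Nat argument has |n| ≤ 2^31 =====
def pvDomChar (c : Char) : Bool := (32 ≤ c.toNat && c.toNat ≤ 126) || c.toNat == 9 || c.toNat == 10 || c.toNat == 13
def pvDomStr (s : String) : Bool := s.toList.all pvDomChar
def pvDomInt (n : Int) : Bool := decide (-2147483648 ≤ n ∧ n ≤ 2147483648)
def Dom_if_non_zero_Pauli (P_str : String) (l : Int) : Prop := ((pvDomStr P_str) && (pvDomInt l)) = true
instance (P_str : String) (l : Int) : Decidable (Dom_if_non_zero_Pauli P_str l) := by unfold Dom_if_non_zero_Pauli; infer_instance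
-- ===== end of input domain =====

-- B replaces A's scan for the first and last non-identity index with a counting
-- sliding-window test: count all non-identity characters, then ask whether some
-- window of 2+2*l consecutive positions contains all of them (objective: alternative).

-- ===== PORT A =====
-- inner loop: 'for j in range(n): if P_str[n-1-j] != "I": return False if n-1-j-i >= 2+2*l else True'
def pvAInner (cs : List Char) (n i : Nat) (l : Int) : List Nat → Option Bool
  | [] => none
  | j :: js =>
    if cs.getD (n - 1 - j) 'I' ≠ 'I' then
      if ((n : Int) - 1 - (j : Int) - (i : Int)) ≥ 2 + 2 * l then some false else some true
    else pvAInner cs n i l js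

-- outer loop: 'for i in range(n): if P_str[i] != "I": <inner loop>'
def pvAOuter (cs : List Char) (n : Nat) (l : Int) : List Nat → Option Bool
  | [] => none
  | i :: is =>
    if cs.getD i 'I' ≠ 'I' then pvAInner cs n i l (List.range n)
    else pvAOuter cs n l is

def if_non_zero_Pauli (P_str : String) (l : Int) : Bool :=
  let cs := P_str.toList
  let n := cs.length
  if P_str = String.ofList (List.replicate n 'I') then false
  -- Python falls off the end (returning None) only when both loops find no non-'I' char,
  -- which the guard above rules out; .getD false is that unreachable fall-through.
  else (pvAOuter cs n l (List.range n)).getD false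

-- ===== PORT B =====
-- 'pref = [0]; for c in P_str: pref.append(pref[-1] + (c != 'I'))'
def pvPref (cs : List Char) : List Int :=
  cs.foldl (fun acc c => acc ++ [PySem.List.pyGetD acc (-1) 0 + (if c ≠ 'I' then (1 : Int) else 0)]) [0]

def if_non_zero_Pauli_alt (P_str : String) (l : Int) : Bool :=
  let cs := P_str.toList
  let n := cs.length
  let pref := pvPref cs
  let total : Int := PySem.List.pyGetD pref (n : Int) 0
  if total = 0 then false
  else
    let k : Int := min (max (2 + 2 * l) 0) (n : Int)
    (PySem.List.pyRange 0 ((n : Int) - k + 1) 1).any (fun i =>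
      PySem.List.pyGetD pref (i + k) 0 - PySem.List.pyGetD pref i 0 == total)

-- ===== PRECONDITION & SPEC =====
def Spec_if_non_zero_Pauli (P_str : String) (l : Int) (out : Bool) : Prop := out = if_non_zero_Pauli_alt P_str l
instance (P_str : String) (l : Int) (out : Bool) : Decidable (Spec_if_non_zero_Pauli P_str l out) := by unfold Spec_if_non_zero_Pauli; infer_instance

-- ===== CLAIM (what is proved, stated in full; the proofs are below) =====
def Claim_equal_if_non_zero_Pauli : Prop := ∀ (P_str : String) (l : Int), Dom_if_non_zero_Pauli P_str l → Spec_if_non_zero_Pauli P_str l (if_non_zero_Pauli P_str l)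

-- ===== LEMMAS AND PROOFS =====

-- find? respects pointwise-equal predicates on the list's elements
theorem pv_find?_congr {α : Type} {q q' : α → Bool} : ∀ (xs : List α),
    (∀ x ∈ xs, q x = q' x) → xs.find? q = xs.find? q'
  | [], _ => rfl
  | x :: xs, h => by
    simp only [List.find?]
    rw [h x (List.mem_cons_self)]
    cases hq : q' x with
    | true => rfl
    | false => exact pv_find?_congr xs (fun y hy => h y (List.mem_cons_of_mem _ hy))

-- the outer loop is a find? followed by the inner loop
theorem pvAOuter_eq (cs : List Char) (n : Nat) (l : Int) : ∀ (js : List Nat),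
    pvAOuter cs n l js =
      (js.find? (fun i => !(cs.getD i 'I' == 'I'))).bind (fun i => pvAInner cs n i l (List.range n))
  | [] => rfl
  | i :: js => by
    simp only [pvAOuter]
    by_cases h : cs.getD i 'I' = 'I'
    · have h' : cs[i]?.getD 'I' = 'I' := h
      rw [if_neg (by simp [h']), List.find?_cons_of_neg (by simp [h']), pvAOuter_eq cs n l js]
    · have h' : ¬ cs[i]?.getD 'I' = 'I' := h
      rw [if_pos h, List.find?_cons_of_pos (by simp [h'])]
      simp

-- the inner loop is a find? followed by the returned comparison
theorem pvAInner_eq (cs : List Char) (n i : Nat) (l : Int) : ∀ (js : List Nat),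
    pvAInner cs n i l js =
      (js.find? (fun j => !(cs.getD (n - 1 - j) 'I' == 'I'))).map
        (fun j => if ((n : Int) - 1 - (j : Int) - (i : Int)) ≥ 2 + 2 * l then false else true)
  | [] => rfl
  | j :: js => by
    simp only [pvAInner]
    by_cases h : cs.getD (n - 1 - j) 'I' = 'I'
    · have h' : cs[n - 1 - j]?.getD 'I' = 'I' := h
      rw [if_neg (by simp [h']), List.find?_cons_of_neg (by simp [h']), pvAInner_eq cs n i l js]
    · have h' : ¬ cs[n - 1 - j]?.getD 'I' = 'I' := h
      rw [if_pos h, List.find?_cons_of_pos (by simp [h'])]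
      split_ifs with hc <;> simp [hc]

-- the first index whose character fails p is the length of the takeWhile prefix
theorem pv_find_range (p : Char → Bool) (dflt : Char) : ∀ (cs : List Char),
    ¬ (∀ c ∈ cs, p c = true) →
    (List.range cs.length).find? (fun i => !(p (cs.getD i dflt))) =
      some ((cs.takeWhile p).length)
  | [], h => absurd (by simp) h
  | c :: cs, h => by
    rw [List.length_cons, List.range_succ_eq_map]
    by_cases hc : p c = true
    · have h' : ¬ (∀ x ∈ cs, p x = true) := fun hall => h (by
        intro x hx
        rcases List.mem_cons.mp hx with rfl | hx
        · exact hc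
        · exact hall x hx)
      rw [List.find?_cons_of_neg (by simp [List.getD, hc]), List.find?_map]
      have hcomp : ((fun i : Nat => !(p ((c :: cs).getD i dflt))) ∘ Nat.succ) =
          (fun i => !(p (cs.getD i dflt))) := by
        funext i; simp [List.getD]
      rw [hcomp, pv_find_range p dflt cs h']
      simp [hc]
    · rw [List.find?_cons_of_pos (by simp [List.getD, hc])]
      simp [hc]

-- the head of a dropWhile result fails the predicate
theorem pv_dropWhile_head (p : Char → Bool) : ∀ (l : List Char) (c : Char) (ds : List Char),
    l.dropWhile p = c :: ds → p c = false
  | [], _, _, h => by simp at h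
  | x :: l, c, ds, h => by
    by_cases hx : p x = true
    · rw [List.dropWhile_cons, if_pos hx] at h
      exact pv_dropWhile_head p l c ds h
    · rw [List.dropWhile_cons, if_neg hx] at h
      cases h
      exact Bool.eq_false_iff.mpr hx

-- the prefix count is 0 exactly up to the leading all-p run (q = negation of p)
theorem pv_count_take_zero_iff (p : Char → Bool) (cs : List Char)
    (hall : ¬ ∀ c ∈ cs, p c = true) (i : Nat) :
    (cs.take i).countP (fun c => !p c) = 0 ↔ i ≤ (cs.takeWhile p).length := by
  have htd : cs.takeWhile p ++ cs.dropWhile p = cs := List.takeWhile_append_dropWhile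
  have hdne : cs.dropWhile p ≠ [] := by
    intro h; exact hall (List.dropWhile_eq_nil_iff.mp h)
  obtain ⟨c, ds, hcds⟩ := List.exists_cons_of_ne_nil hdne
  have hpc : p c = false := pv_dropWhile_head p cs c ds hcds
  have hdrop : cs.drop (cs.takeWhile p).length = c :: ds := by
    have h2 : (cs.takeWhile p ++ cs.dropWhile p).drop (cs.takeWhile p).length =
        cs.dropWhile p := List.drop_left
    rw [htd] at h2
    rw [h2, hcds]
  have hget : cs[(cs.takeWhile p).length]? = some c := by
    have h1 : (cs.drop (cs.takeWhile p).length)[0]? = some c := by rw [hdrop]; rfl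
    rwa [List.getElem?_drop, Nat.add_zero] at h1
  constructor
  · intro h0
    by_contra hlt
    replace hlt : (cs.takeWhile p).length < i := Nat.lt_of_not_le hlt
    have hmem : c ∈ cs.take i := by
      apply List.mem_of_getElem? (i := (cs.takeWhile p).length)
      rw [List.getElem?_take_of_lt hlt, hget]
    have := (List.countP_eq_zero.mp h0) c hmem
    simp [hpc] at this
  · intro hi
    apply List.countP_eq_zero.mpr
    intro a ha
    have hmem : a ∈ cs.takeWhile p := by
      have h1 : cs.take i = (cs.takeWhile p).take i := by
        conv_lhs => rw [← htd]
        rw [List.take_append_of_le_length hi]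
      exact List.mem_of_mem_take (by rw [← h1]; exact ha)
    have hp := List.mem_takeWhile_imp hmem
    simp [hp]

-- the prefix count reaches the full count exactly from (length − trailing run) on
theorem pv_count_take_total_iff (p : Char → Bool) (cs : List Char)
    (hall : ¬ ∀ c ∈ cs, p c = true) (j : Nat) (hj : j ≤ cs.length) :
    (cs.take j).countP (fun c => !p c) = cs.countP (fun c => !p c) ↔
      cs.length - (cs.reverse.takeWhile p).length ≤ j := by
  have hsplit : cs.countP (fun c => !p c) =
      (cs.take j).countP (fun c => !p c) + (cs.drop j).countP (fun c => !p c) := by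
    conv_lhs => rw [← List.take_append_drop j cs]
    rw [List.countP_append]
  have hdropzero : (cs.take j).countP (fun c => !p c) = cs.countP (fun c => !p c) ↔
      (cs.drop j).countP (fun c => !p c) = 0 := by omega
  have hrev : (cs.drop j).countP (fun c => !p c) =
      (cs.reverse.take (cs.length - j)).countP (fun c => !p c) := by
    rw [← List.reverse_drop, List.countP_reverse]
  have hallrev : ¬ ∀ c ∈ cs.reverse, p c = true := by
    intro h; exact hall (fun c hc => h c (by simpa using hc))
  rw [hdropzero, hrev, pv_count_take_zero_iff p cs.reverse hallrev]
  have hle : (cs.reverse.takeWhile p).length ≤ cs.length := by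
    have := (List.takeWhile_sublist p (l := cs.reverse)).length_le
    simpa using this
  omega

-- the prefix list built by B's loop is the table of prefix non-identity counts
theorem pvPref_eq (cs : List Char) :
    pvPref cs = (List.range (cs.length + 1)).map
      (fun m => (((cs.take m).countP (fun c => !(c == 'I')) : Nat) : Int)) := by
  induction cs using List.reverseRecOn with
  | nil => simp [pvPref]
  | append_singleton xs x ih =>
    have h1 : pvPref (xs ++ [x]) = pvPref xs ++
        [PySem.List.pyGetD (pvPref xs) (-1) 0 + (if x ≠ 'I' then (1 : Int) else 0)] := by
      unfold pvPref
      rw [List.foldl_append]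
      rfl
    rw [h1, ih, List.length_append, List.length_singleton]
    conv_rhs => rw [List.range_succ, List.map_append]
    congr 1
    · apply List.map_congr_left
      intro m hm
      have hmle : m ≤ xs.length := by
        have := List.mem_range.mp hm; omega
      rw [List.take_append_of_le_length hmle]
    · have hsplit : (List.range (xs.length + 1)).map
          (fun m => (((xs.take m).countP (fun c => !(c == 'I')) : Nat) : Int)) =
          (List.range xs.length).map
            (fun m => (((xs.take m).countP (fun c => !(c == 'I')) : Nat) : Int)) ++
          [((xs.take xs.length).countP (fun c => !(c == 'I')) : Int)] := by
        rw [List.range_succ, List.map_append]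
        rfl
      rw [hsplit, PySem.List.pyGetD_neg_one_append_singleton]
      have htake : (xs ++ [x]).take (xs.length + 1) = xs ++ [x] := by
        have hlen : (xs ++ [x]).length = xs.length + 1 := by simp
        rw [← hlen, List.take_length]
      simp only [List.map_cons, List.map_nil]
      rw [htake, List.take_length, List.countP_append]
      have hx : List.countP (fun c => !(c == 'I')) [x] = if x ≠ 'I' then 1 else 0 := by
        by_cases hc : x = 'I' <;> simp [hc]
      rw [hx]
      split_ifs <;> push_cast <;> simp

-- reading B's prefix table at a valid index
theorem pvPref_getD (cs : List Char) (m : Nat) (hm : m ≤ cs.length) :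
    PySem.List.pyGetD (pvPref cs) (m : Int) 0 =
      (((cs.take m).countP (fun c => !(c == 'I')) : Nat) : Int) := by
  rw [pvPref_eq, PySem.List.pyGetD_natCast, PySem.List.getD_map_range _ _ _ _ (by omega)]

-- main equivalence
theorem pv_main (P_str : String) (l : Int) :
    if_non_zero_Pauli P_str l = if_non_zero_Pauli_alt P_str l := by
  set p : Char → Bool := fun c => c == 'I' with hp
  set cs := P_str.toList with hcs
  by_cases hall : ∀ c ∈ cs, p c = true
  · -- all-identity (or empty) string: both sides are false
    have hrep : cs = List.replicate cs.length 'I' := by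
      apply List.eq_replicate_of_mem
      intro b hb
      simpa [hp] using hall b hb
    have hA : if_non_zero_Pauli P_str l = false := by
      unfold if_non_zero_Pauli
      rw [if_pos]
      conv_lhs => rw [← @String.ofList_toList P_str]
      rw [← hcs]
      conv_lhs => rw [hrep]
    have hcnt : cs.countP (fun c => !p c) = 0 := by
      apply List.countP_eq_zero.mpr
      intro a ha
      simp [hall a ha]
    have hB : if_non_zero_Pauli_alt P_str l = false := by
      simp only [if_non_zero_Pauli_alt]
      rw [← hcs]
      have h0 : PySem.List.pyGetD (pvPref cs) ((cs.length : Nat) : Int) 0 =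
          ((cs.take cs.length).countP (fun c => !(c == 'I')) : Int) :=
        pvPref_getD cs cs.length le_rfl
      rw [h0, List.take_length]
      have h1 : cs.countP (fun c => !(c == 'I')) = 0 := hcnt
      rw [h1]
      simp
    rw [hA, hB]
  · -- some non-identity character exists
    set q : Char → Bool := fun c => !(p c) with hq
    set n := cs.length with hn
    set i0 := (cs.takeWhile p).length with hi0
    set j0 := (cs.reverse.takeWhile p).length with hj0
    set total := cs.countP q with htotdef
    set k : Int := min (max (2 + 2 * l) 0) (n : Int) with hkdef
    have hk0 : (0 : Int) ≤ k := le_min (le_max_right _ _) (Int.natCast_nonneg n)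
    have hkn : k ≤ (n : Int) := min_le_right _ _
    have hi0le : i0 ≤ n := by
      have := (List.takeWhile_sublist p (l := cs)).length_le
      simpa [hi0, hn] using this
    have hj0le : j0 ≤ n := by
      have := (List.takeWhile_sublist p (l := cs.reverse)).length_le
      simpa [hj0, hn] using this
    -- A's side: the two found indices are i0 and n - 1 - j0
    have hne : ¬ P_str = String.ofList (List.replicate cs.length 'I') := by
      intro h
      apply hall
      intro c hc
      have h2 : cs = List.replicate cs.length 'I' := by
        have h3 := congrArg String.toList h
        rwa [String.toList_ofList, ← hcs] at h3
      rw [h2] at hc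
      simp [hp, List.eq_of_mem_replicate hc]
    have hfind1 : (List.range cs.length).find? (fun i => !(cs.getD i 'I' == 'I')) = some i0 :=
      pv_find_range p 'I' cs hall
    have hall' : ¬ (∀ c ∈ cs.reverse, p c = true) := by
      intro h; exact hall (fun c hc => h c (by simpa using hc))
    have hfind2 : (List.range cs.length).find?
        (fun j => !(cs.getD (cs.length - 1 - j) 'I' == 'I')) = some j0 := by
      have hcong : (List.range cs.length).find?
          (fun j => !(cs.getD (cs.length - 1 - j) 'I' == 'I')) =
          (List.range cs.length).find? (fun j => !(cs.reverse.getD j 'I' == 'I')) := by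
        apply pv_find?_congr
        intro j hj
        have hjn : j < cs.length := List.mem_range.mp hj
        have hg : cs.reverse.getD j 'I' = cs.getD (cs.length - 1 - j) 'I' := by
          rw [List.getD_eq_getElem?_getD, List.getD_eq_getElem?_getD,
            List.getElem?_reverse hjn]
        rw [hg]
      rw [hcong]
      have hfr := pv_find_range p 'I' cs.reverse hall'
      rwa [List.length_reverse] at hfr
    have hA : if_non_zero_Pauli P_str l =
        (if ((n : Int) - 1 - (j0 : Int) - (i0 : Int)) ≥ 2 + 2 * l
          then false else true) := by
      unfold if_non_zero_Pauli
      rw [if_neg (by rw [← hcs]; exact hne)]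
      rw [← hcs]
      rw [pvAOuter_eq, hfind1]
      simp only [Option.bind_some]
      rw [pvAInner_eq, hfind2]
      rfl
    -- B's side
    have htotpos : 0 < total := by
      rw [htotdef]
      apply List.countP_pos_iff.mpr
      rcases not_forall.mp hall with ⟨c, hc⟩
      rcases Classical.not_imp.mp hc with ⟨hcm, hcp⟩
      exact ⟨c, hcm, by simp [hq, Bool.eq_false_iff.mpr hcp]⟩
    have hB : if_non_zero_Pauli_alt P_str l =
        (PySem.List.pyRange 0 ((n : Int) - k + 1) 1).any (fun i =>
          PySem.List.pyGetD (pvPref cs) (i + k) 0 - PySem.List.pyGetD (pvPref cs) i 0 ==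
            (total : Int)) := by
      simp only [if_non_zero_Pauli_alt]
      rw [← hcs, ← hn]
      have htoteq : PySem.List.pyGetD (pvPref cs) ((n : Nat) : Int) 0 = (total : Int) := by
        have h0 : PySem.List.pyGetD (pvPref cs) ((n : Nat) : Int) 0 =
            ((cs.take n).countP q : Int) := pvPref_getD cs n (by omega)
        rw [h0]
        congr 1
        rw [htotdef, hn, List.take_length]
      rw [htoteq, ← hkdef]
      rw [if_neg (by exact_mod_cast Nat.pos_iff_ne_zero.mp htotpos)]
    -- the window predicate, characterised index by index
    have hchar : ∀ i : Int, 0 ≤ i → i < (n : Int) - k + 1 →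
        ((PySem.List.pyGetD (pvPref cs) (i + k) 0 - PySem.List.pyGetD (pvPref cs) i 0 ==
            (total : Int)) = true ↔
          (i.toNat ≤ i0 ∧ n - j0 ≤ i.toNat + k.toNat)) := by
      intro i hi hilt
      set i' := i.toNat with hi'
      have hin : i' + k.toNat ≤ n := by omega
      have hg1 : PySem.List.pyGetD (pvPref cs) (i + k) 0 =
          ((cs.take (i' + k.toNat)).countP q : Int) := by
        have hik : i + k = ((i' + k.toNat : Nat) : Int) := by omega
        rw [hik]
        exact pvPref_getD cs _ (by omega)
      have hg2 : PySem.List.pyGetD (pvPref cs) i 0 = ((cs.take i').countP q : Int) := by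
        have hii : i = ((i' : Nat) : Int) := by omega
        rw [hii]
        exact pvPref_getD cs i' (by omega)
      rw [hg1, hg2, beq_iff_eq]
      have hwin : cs.take (i' + k.toNat) = cs.take i' ++ (cs.drop i').take k.toNat :=
        List.take_add
      have hineq : (cs.take i').countP q + ((cs.drop i').take k.toNat).countP q =
          (cs.take (i' + k.toNat)).countP q := by
        rw [hwin, List.countP_append]
      have hub : (cs.take (i' + k.toNat)).countP q ≤ total := by
        rw [htotdef]
        exact (List.take_sublist _ _).countP_le
      constructor
      · intro h
        have h1 : (cs.take i').countP q = 0 := by omega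
        have h2 : (cs.take (i' + k.toNat)).countP q = total := by omega
        constructor
        · exact (pv_count_take_zero_iff p cs hall i').mp h1
        · exact (pv_count_take_total_iff p cs hall (i' + k.toNat) hin).mp h2
      · rintro ⟨h1, h2⟩
        have hz : (cs.take i').countP q = 0 :=
          (pv_count_take_zero_iff p cs hall i').mpr h1
        have ht : (cs.take (i' + k.toNat)).countP q = total :=
          (pv_count_take_total_iff p cs hall (i' + k.toNat) hin).mpr h2
        omega
    -- the whole any, as one arithmetic condition
    have hkey : ((PySem.List.pyRange 0 ((n : Int) - k + 1) 1).any (fun i =>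
          PySem.List.pyGetD (pvPref cs) (i + k) 0 - PySem.List.pyGetD (pvPref cs) i 0 ==
            (total : Int)) = true)
        ↔ n - j0 - i0 ≤ k.toNat := by
      rw [List.any_eq_true]
      constructor
      · rintro ⟨i, hmem, hpred⟩
        obtain ⟨hi0', hilt⟩ := PySem.List.mem_pyRange_one.mp hmem
        obtain ⟨ha, hb⟩ := (hchar i hi0' hilt).mp hpred
        omega
      · intro hspan
        refine ⟨min (i0 : Int) ((n : Int) - k), ?_, ?_⟩
        · exact PySem.List.mem_pyRange_one.mpr (by omega)
        · apply (hchar _ (by omega) (by omega)).mpr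
          constructor <;> omega
    -- i0 + j0 < n: position i0 is non-identity, so it is not in the trailing run
    have hi0j0 : i0 + j0 < n := by
      have hz : (cs.take i0).countP q = 0 :=
        (pv_count_take_zero_iff p cs hall i0).mpr le_rfl
      have hnt : ¬ (n - j0 ≤ i0) := by
        intro hcon
        have h2 : (cs.take i0).countP q = cs.countP q :=
          (pv_count_take_total_iff p cs hall i0 hi0le).mpr hcon
        omega
      omega
    -- put the two sides together
    rw [hA, hB]
    by_cases hcond : ((n : Int) - 1 - (j0 : Int) - (i0 : Int)) ≥ 2 + 2 * l
    · rw [if_pos hcond]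
      have : ¬ (n - j0 - i0 ≤ k.toNat) := by omega
      exact ((Bool.not_eq_true _).mp (fun h => this (hkey.mp h))).symm
    · rw [if_neg hcond]
      exact (hkey.mpr (by omega)).symm

-- ===== VERDICT (by name: the statement is the Claim_ definition above) =====
theorem if_non_zero_Pauli_spec : Claim_equal_if_non_zero_Pauli := by
  intro P_str l _
  unfold Spec_if_non_zero_Pauli
  exact pv_main P_str l
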